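-- pv_equiv track=rewrite | github.com/nadiavhansen/Python-Projects | pythonProject2/passYuri.py | SequentialLetters3more
-- ===== SOURCE A (Python) =====
-- import string
--
-- def SequentialLetters3more(password):
--     n = 0
--     password = password + "!!"
--     setpassword = set()
--     for letra in range(len(password) - 2):
--         sequencia = password[letra].lower() + password[letra + 1].lower() + \
--                     password[letra + 2].lower()
--         if sequencia in string.ascii_lowercase:
--             setpassword.add(sequencia)
--     n = len(setpassword)
--     pontos = (n * (-3))
--     return ["Sequential Letters (3+)", pontos]
-- ===== SOURCE B (Python) =====
-- import string
--
-- def SequentialLetters3more(password):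
--     pwd = password.lower()
--     triples = [string.ascii_lowercase[i:i + 3] for i in range(24)]
--     count = sum(1 for t in triples if t in pwd)
--     return ["Sequential Letters (3+)", -3 * count]
-- ===== Notes on version B (the rewrite author's own statement) =====
-- stated objective: faster
-- what changed: Instead of scanning every 3-char window of the sentinel-extended password and collecting sequential ones into a set, B lowercases the password once and counts how many of the 24 fixed sequential alphabet triples occur as substrings of it, needing no sentinel and no set.
import Mathlib
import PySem

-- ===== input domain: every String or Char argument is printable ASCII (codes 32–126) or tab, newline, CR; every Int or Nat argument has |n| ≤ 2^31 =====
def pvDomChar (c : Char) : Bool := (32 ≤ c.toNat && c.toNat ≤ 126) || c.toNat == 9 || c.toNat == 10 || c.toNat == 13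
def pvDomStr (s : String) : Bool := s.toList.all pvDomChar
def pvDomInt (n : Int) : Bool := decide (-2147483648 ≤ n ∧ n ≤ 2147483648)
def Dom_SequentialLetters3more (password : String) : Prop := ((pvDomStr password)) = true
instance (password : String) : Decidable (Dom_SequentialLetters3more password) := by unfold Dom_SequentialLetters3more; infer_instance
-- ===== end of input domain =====

-- B inverts A's scan: instead of testing every 3-char window of the sentinel-extended password
-- against the alphabet and deduplicating with a set, it counts which of the 24 fixed sequential
-- triples occur as substrings of the once-lowercased password (objective: faster, constant-factor).

-- ===== PORT A =====
-- string.ascii_lowercase (shared module constant)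
def pvAlphabet : List Char :=
  ['a','b','c','d','e','f','g','h','i','j','k','l','m',
   'n','o','p','q','r','s','t','u','v','w','x','y','z']

-- Literal port of A: password += "!!", scan every 3-char window, collect the ones that are
-- substrings of the alphabet into a set, score -3 per element.
-- password[letra+k] is ported as getD; exact since letra + 2 < pw.length on every iteration.
def SequentialLetters3more (password : String) : String × Int :=
  let pw := password.toList ++ ['!', '!']
  let setpassword : PySem.Set (List Char) :=
    (List.range (pw.length - 2)).foldl
      (fun (st : PySem.Set (List Char)) letra =>
        let sequencia := [PySem.Chars.lowerChar (pw.getD letra ' '),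
                          PySem.Chars.lowerChar (pw.getD (letra + 1) ' '),
                          PySem.Chars.lowerChar (pw.getD (letra + 2) ' ')]
        if PySem.Chars.isIn sequencia pvAlphabet then PySem.Set.add st sequencia else st)
      PySem.Set.empty
  ("Sequential Letters (3+)", (setpassword.length : Int) * (-3))

-- ===== PORT B =====
def SequentialLetters3more_alt (password : String) : String × Int :=
  let pwd := PySem.Chars.lower password.toList
  let triples := (List.range 24).map
    (fun (i : Nat) => PySem.List.slice pvAlphabet (some (i : Int)) (some ((i : Int) + 3)))
  let count : Int := (triples.map (fun t => if PySem.Chars.isIn t pwd then (1 : Int) else 0)).sum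
  ("Sequential Letters (3+)", -3 * count)

-- ===== PRECONDITION & SPEC =====
def Spec_SequentialLetters3more (password : String) (out : String × Int) : Prop := out = SequentialLetters3more_alt password
instance (password : String) (out : String × Int) : Decidable (Spec_SequentialLetters3more password out) := by unfold Spec_SequentialLetters3more; infer_instance

-- ===== CLAIM (what is proved, stated in full; the proofs are below) =====
def Claim_equal_SequentialLetters3more : Prop := ∀ (password : String), Dom_SequentialLetters3more password → Spec_SequentialLetters3more password (SequentialLetters3more password)

-- ===== LEMMAS AND PROOFS =====

-- the 3-char window of M starting at i (proof-side abbreviation)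
def pvWin (M : List Char) (i : Nat) : List Char :=
  [M.getD i ' ', M.getD (i + 1) ' ', M.getD (i + 2) ' ']

-- membership in A's set-building fold
lemma mem_foldl_add_if {α : Type} [BEq α] [LawfulBEq α]
    (l : List Nat) (p : α → Bool) (f : Nat → α) (s : PySem.Set α) (t : α) :
    t ∈ l.foldl (fun st i => if p (f i) then PySem.Set.add st (f i) else st) s ↔
      t ∈ s ∨ ∃ i ∈ l, p (f i) = true ∧ f i = t := by
  induction l generalizing s with
  | nil => simp
  | cons x xs ih =>
    simp only [List.foldl_cons, List.mem_cons]
    by_cases h : p (f x) = true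
    · rw [if_pos h, ih]
      simp only [PySem.Set.mem_add]
      constructor
      · rintro (⟨hs | rfl⟩ | ⟨i, hi, hp, rfl⟩)
        · exact Or.inl hs
        · exact Or.inr ⟨x, Or.inl rfl, h, rfl⟩
        · exact Or.inr ⟨i, Or.inr hi, hp, rfl⟩
      · rintro (hs | ⟨i, (rfl | hi), hp, rfl⟩)
        · exact Or.inl (Or.inl hs)
        · exact Or.inl (Or.inr rfl)
        · exact Or.inr ⟨i, hi, hp, rfl⟩
    · rw [if_neg h, ih]
      constructor
      · rintro (hs | ⟨i, hi, hp, rfl⟩)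
        · exact Or.inl hs
        · exact Or.inr ⟨i, Or.inr hi, hp, rfl⟩
      · rintro (hs | ⟨i, (rfl | hi), hp, rfl⟩)
        · exact Or.inl hs
        · exact absurd hp h
        · exact Or.inr ⟨i, hi, hp, rfl⟩

-- A's fold keeps the set duplicate-free
lemma nodup_foldl_add_if {α : Type} [BEq α] [LawfulBEq α]
    (l : List Nat) (p : α → Bool) (f : Nat → α) (s : PySem.Set α) (hs : s.Nodup) :
    (l.foldl (fun st i => if p (f i) then PySem.Set.add st (f i) else st) s).Nodup := by
  induction l generalizing s with
  | nil => exact hs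
  | cons x xs ih =>
    simp only [List.foldl_cons]
    by_cases h : p (f x) = true
    · rw [if_pos h]; exact ih _ (PySem.Set.nodup_add _ _ hs)
    · rw [if_neg h]; exact ih _ hs

lemma take3_drop (M : List Char) (i : Nat) (h : i + 2 < M.length) :
    (M.drop i).take 3 = pvWin M i := by
  have h0 : i < M.length := by omega
  have h1 : i + 1 < M.length := by omega
  apply List.ext_getElem
  · simp [pvWin]; omega
  · intro k hk hk'
    simp only [List.length_take, List.length_drop] at hk
    have hk3 : k < 3 := by omega
    have hik : i + k < M.length := by omega
    rw [List.getElem_take, List.getElem_drop]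
    interval_cases k <;> simp [pvWin, List.getD_eq_getElem?_getD, h0, h1, h]

-- a 3-char list is an infix of M iff it is one of M's windows
lemma infix3 (M t : List Char) :
    (∃ i, i + 2 < M.length ∧ pvWin M i = t) ↔ t.length = 3 ∧ t <:+: M := by
  constructor
  · rintro ⟨i, hi, rfl⟩
    refine ⟨rfl, ?_⟩
    rw [← take3_drop M i hi]
    exact ((M.drop i).take_prefix 3).isInfix.trans (M.drop_suffix i).isInfix
  · rintro ⟨hlen, pre, suf, rfl⟩
    refine ⟨pre.length, ?_, ?_⟩
    · simp [hlen]; omega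
    · rw [← take3_drop _ pre.length (by simp [hlen]; omega)]
      rw [List.append_assoc, List.drop_left, ← hlen, List.take_left]

theorem SequentialLetters3more_spec : Claim_equal_SequentialLetters3more := by
  intro password _
  unfold Spec_SequentialLetters3more
  simp only [SequentialLetters3more, SequentialLetters3more_alt]
  generalize password.toList = cs
  congr 1
  -- notation
  set n := cs.length with hn
  set L := cs.map PySem.Chars.lowerChar with hLdef
  have hL' : L.length = n := by simp [hLdef, hn]
  have hA26 : pvAlphabet.length = 26 := by decide
  -- rewrite the range bound
  rw [show (cs ++ ['!', '!']).length - 2 = n by simp [hn]]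
  -- per-char lowering commutes with the "!!" sentinel append
  have hE : ∀ j, PySem.Chars.lowerChar ((cs ++ ['!', '!']).getD j ' ')
      = (L ++ ['!', '!']).getD j ' ' := by
    intro j
    have hmapE : (cs ++ ['!', '!']).map PySem.Chars.lowerChar = L ++ ['!', '!'] := by
      rw [List.map_append]; rfl
    rw [← hmapE]
    exact (List.getD_map (cs ++ ['!', '!']) ' ' PySem.Chars.lowerChar).symm
  -- rewrite the fold body to windows of the lowercased extended password
  rw [show
      (fun (st : PySem.Set (List Char)) letra =>
        if PySem.Chars.isIn [PySem.Chars.lowerChar ((cs ++ ['!', '!']).getD letra ' '),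
              PySem.Chars.lowerChar ((cs ++ ['!', '!']).getD (letra + 1) ' '),
              PySem.Chars.lowerChar ((cs ++ ['!', '!']).getD (letra + 2) ' ')] pvAlphabet
        then PySem.Set.add st [PySem.Chars.lowerChar ((cs ++ ['!', '!']).getD letra ' '),
              PySem.Chars.lowerChar ((cs ++ ['!', '!']).getD (letra + 1) ' '),
              PySem.Chars.lowerChar ((cs ++ ['!', '!']).getD (letra + 2) ' ')]
        else st)
      = (fun (st : PySem.Set (List Char)) letra =>
          if PySem.Chars.isIn (pvWin (L ++ ['!', '!']) letra) pvAlphabet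
          then PySem.Set.add st (pvWin (L ++ ['!', '!']) letra) else st)
    from by funext st i; simp only [pvWin, hE]]
  set S := (List.range n).foldl
    (fun (st : PySem.Set (List Char)) letra =>
      if PySem.Chars.isIn (pvWin (L ++ ['!', '!']) letra) pvAlphabet
      then PySem.Set.add st (pvWin (L ++ ['!', '!']) letra) else st)
    PySem.Set.empty with hSdef
  -- a window that reaches into the sentinel is never sequential
  have hg_low : ∀ i, i < n → ¬ (i + 2 < n) →
      PySem.Chars.isIn (pvWin (L ++ ['!', '!']) i) pvAlphabet = false := by
    intro i h1 h2
    have hbang : (L ++ ['!', '!']).getD (i + 2) ' ' = '!' := by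
      rw [List.getD_append_right _ _ _ _ (by omega)]
      have : i + 2 - L.length = 0 ∨ i + 2 - L.length = 1 := by omega
      rcases this with h | h <;> rw [h] <;> rfl
    by_contra hcon
    rw [Bool.not_eq_false] at hcon
    have hinf : pvWin (L ++ ['!', '!']) i <:+: pvAlphabet :=
      (PySem.Chars.isIn_iff_infix _ _).1 hcon
    have hmem : '!' ∈ pvWin (L ++ ['!', '!']) i := by
      simp only [pvWin, List.mem_cons]
      exact Or.inr (Or.inr (Or.inl hbang.symm))
    have := hinf.subset hmem
    simp [pvAlphabet] at this
  -- a window inside the password is a window of L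
  have hg_win : ∀ i, i + 2 < n → pvWin (L ++ ['!', '!']) i = pvWin L i := by
    intro i h
    simp only [pvWin]
    rw [List.getD_append _ _ _ _ (by omega), List.getD_append _ _ _ _ (by omega),
        List.getD_append _ _ _ _ (by omega)]
  -- membership characterisation of A's set
  have hSmem : ∀ t, t ∈ S ↔ (t.length = 3 ∧ t <:+: L) ∧ t <:+: pvAlphabet := by
    intro t
    have h1 := mem_foldl_add_if (List.range n)
      (fun u => PySem.Chars.isIn u pvAlphabet) (pvWin (L ++ ['!', '!']))
      PySem.Set.empty t
    rw [hSdef]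
    rw [show (t ∈ PySem.Set.empty) = False by simp [PySem.Set.empty], false_or] at h1
    rw [h1]
    constructor
    · rintro ⟨i, hi, hp, rfl⟩
      rw [List.mem_range] at hi
      by_cases h2 : i + 2 < n
      · rw [hg_win i h2] at hp ⊢
        refine ⟨?_, (PySem.Chars.isIn_iff_infix _ _).1 hp⟩
        exact (infix3 L _).1 ⟨i, by omega, rfl⟩
      · rw [hg_low i hi h2] at hp; exact absurd hp (by simp)
    · rintro ⟨⟨hlen3, hinfL⟩, hinfA⟩
      obtain ⟨i, hi, hw⟩ := (infix3 L t).2 ⟨hlen3, hinfL⟩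
      rw [hL'] at hi
      refine ⟨i, List.mem_range.2 (by omega), ?_, ?_⟩
      · rw [hg_win i hi, hw]; exact (PySem.Chars.isIn_iff_infix _ _).2 hinfA
      · rw [hg_win i hi, hw]
  -- B's candidate triples are exactly the 3-char infixes of the alphabet
  have hfT : ∀ (i : Nat), i < 24 →
      PySem.List.slice pvAlphabet (some (i : Int)) (some ((i : Int) + 3)) = pvWin pvAlphabet i := by
    intro i hi
    interval_cases i <;> rfl
  have hTmem : ∀ t,
      t ∈ (List.range 24).map
        (fun (i : Nat) => PySem.List.slice pvAlphabet (some (i : Int)) (some ((i : Int) + 3))) ↔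
      t.length = 3 ∧ t <:+: pvAlphabet := by
    intro t
    rw [List.mem_map]
    constructor
    · rintro ⟨i, hi, rfl⟩
      rw [List.mem_range] at hi
      rw [hfT i hi]
      exact (infix3 pvAlphabet _).1 ⟨i, by omega, rfl⟩
    · rintro ⟨hlen3, hinf⟩
      obtain ⟨i, hi, hw⟩ := (infix3 pvAlphabet t).2 ⟨hlen3, hinf⟩
      rw [hA26] at hi
      exact ⟨i, List.mem_range.2 (by omega), by rw [hfT i (by omega), hw]⟩
  -- turn B's 0/1 sum into a filter length
  rw [PySem.List.sum_map_ite_one_zero (fun t => PySem.Chars.isIn t (PySem.Chars.lower cs))]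
  rw [List.countP_eq_length_filter]
  have hlowcs : PySem.Chars.lower cs = L := rfl
  -- both sides are the length of lists with the same members and no duplicates
  have hndS : S.Nodup := nodup_foldl_add_if (List.range n)
    (fun u => PySem.Chars.isIn u pvAlphabet) (pvWin (L ++ ['!', '!']))
    PySem.Set.empty (by simp [PySem.Set.empty])
  have hndF : (((List.range 24).map
      (fun (i : Nat) => PySem.List.slice pvAlphabet (some (i : Int)) (some ((i : Int) + 3)))).filter
      (fun t => PySem.Chars.isIn t (PySem.Chars.lower cs))).Nodup :=
    List.Nodup.filter _ (by decide)
  have hperm := (List.perm_ext_iff_of_nodup hndS hndF).2 (by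
    intro t
    rw [hSmem t, List.mem_filter, hTmem t, hlowcs]
    constructor
    · rintro ⟨⟨hlen3, hinfL⟩, hinfA⟩
      exact ⟨⟨hlen3, hinfA⟩, (PySem.Chars.isIn_iff_infix _ _).2 hinfL⟩
    · rintro ⟨⟨hlen3, hinfA⟩, hinL⟩
      exact ⟨⟨hlen3, (PySem.Chars.isIn_iff_infix _ _).1 hinL⟩, hinfA⟩)
  rw [hperm.length_eq]
  ring

-- ===== VERDICT moved above (single theorem) =====
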